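-- pv_equiv track=rewrite | github.com/agvelazquez/Python-porgramming-course-UNSAM | comparaciones_ordenamiento.py | buscar_max
-- ===== SOURCE A (Python) =====
-- def buscar_max(lista, a, b):
--     """Devuelve la posición del máximo elemento en un segmento de
--        lista de elementos comparables.
--        La lista no debe ser vacía.
--        a y b son las posiciones inicial y final del segmento"""
--
--     pos_max = a
--     comparaciones = 0
--     for i in range(a + 1, b + 1):
--         if lista[i] > lista[pos_max]:
--             pos_max = i
--         comparaciones += 1
--     return pos_max, comparaciones
-- ===== SOURCE B (Python) =====
-- def buscar_max(lista, a, b):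
--     # Divide-and-conquer tournament over the segment [a, b]; same result and
--     # comparison count (b - a when a < b, else 0) as the linear scan.
--     if b <= a:
--         return (a, 0)
--     mid = (a + b) // 2
--     pl, cl = buscar_max(lista, a, mid)
--     pr, cr = buscar_max(lista, mid + 1, b)
--     pos = pr if lista[pr] > lista[pl] else pl
--     return (pos, cl + cr + 1)
-- ===== Notes on version B (the rewrite author's own statement) =====
-- stated objective: alternative
-- what changed: Replaces the linear left-to-right scan with a recursive divide-and-conquer tournament that splits the segment at its midpoint and combines the two halves with one strict comparison (keeping the leftmost maximum and the same comparison count b-a).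
import Mathlib
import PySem

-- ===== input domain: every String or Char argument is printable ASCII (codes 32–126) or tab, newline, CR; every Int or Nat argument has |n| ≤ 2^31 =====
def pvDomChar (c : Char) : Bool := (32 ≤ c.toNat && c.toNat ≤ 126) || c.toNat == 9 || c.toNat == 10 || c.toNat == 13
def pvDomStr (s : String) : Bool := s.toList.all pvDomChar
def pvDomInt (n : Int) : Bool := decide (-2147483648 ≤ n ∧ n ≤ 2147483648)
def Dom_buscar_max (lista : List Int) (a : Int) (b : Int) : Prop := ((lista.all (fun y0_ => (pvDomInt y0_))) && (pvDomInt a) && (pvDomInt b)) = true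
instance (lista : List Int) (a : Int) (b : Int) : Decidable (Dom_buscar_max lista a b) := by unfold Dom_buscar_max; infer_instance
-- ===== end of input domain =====

-- B replaces A's linear scan by a divide-and-conquer tournament over the segment;
-- same result (leftmost maximum, comparison count b-a) — objective: alternative.

-- ===== PORT A =====
-- Literal port of A's for-loop over range(a+1, b+1) threading (pos_max, comparaciones).
-- lista[i] is ported as pyGetD lista i 0; Pre_ guarantees every accessed index is in
-- Python range (outside Pre_ the Python raises IndexError).
def buscar_max (lista : List Int) (a : Int) (b : Int) : Int × Int :=
  (PySem.List.pyRange (a + 1) (b + 1) 1).foldl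
    (fun st i =>
      ((if PySem.List.pyGetD lista i 0 > PySem.List.pyGetD lista st.1 0 then i else st.1),
       st.2 + 1))
    (a, 0)

-- ===== PORT B =====
-- Literal port of Source B's recursive tournament.
def buscar_max_alt (lista : List Int) (a : Int) (b : Int) : Int × Int :=
  if _h : b ≤ a then (a, 0)
  else
    let mid := PySem.Int.floordiv (a + b) 2
    have hmid : a ≤ mid ∧ mid < b := by
      constructor
      · rw [PySem.Int.le_floordiv_iff_mul_le (by omega)]; omega
      · rw [PySem.Int.floordiv_lt_iff_lt_mul (by omega)]; omega
    let l := buscar_max_alt lista a mid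
    let r := buscar_max_alt lista (mid + 1) b
    ((if PySem.List.pyGetD lista r.1 0 > PySem.List.pyGetD lista l.1 0 then r.1 else l.1),
     l.2 + r.2 + 1)
termination_by (b - a).toNat
decreasing_by
  · omega
  · omega

-- ===== PRECONDITION & SPEC =====
-- Pre_ excludes exactly the inputs on which Python A raises IndexError: a nonempty
-- segment (a < b) reaching an index outside [-len(lista), len(lista)).
def Pre_buscar_max (lista : List Int) (a : Int) (b : Int) : Prop :=
  b ≤ a ∨ (-(lista.length : Int) ≤ a ∧ b < (lista.length : Int))
instance (lista : List Int) (a : Int) (b : Int) : Decidable (Pre_buscar_max lista a b) := by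
  unfold Pre_buscar_max; infer_instance

def pvWitness_buscar_max : List Int × Int × Int := ([3, 1, 4, 1, 5], 0, 4)

def Spec_buscar_max (lista : List Int) (a : Int) (b : Int) (out : Int × Int) : Prop := out = buscar_max_alt lista a b
instance (lista : List Int) (a : Int) (b : Int) (out : Int × Int) : Decidable (Spec_buscar_max lista a b out) := by unfold Spec_buscar_max; infer_instance

-- ===== CLAIM (what is proved, stated in full; the proofs are below) =====
def Claim_equal_buscar_max : Prop := ∀ (lista : List Int) (a : Int) (b : Int), Dom_buscar_max lista a b → Pre_buscar_max lista a b → Spec_buscar_max lista a b (buscar_max lista a b)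

-- ===== LEMMAS AND PROOFS =====

-- the selection step shared by both ports: leftmost strict maximum of two positions
def selv (lista : List Int) (p i : Int) : Int :=
  if PySem.List.pyGetD lista i 0 > PySem.List.pyGetD lista p 0 then i else p

theorem selv_assoc (lista : List Int) (p q r : Int) :
    selv lista (selv lista p q) r = selv lista p (selv lista q r) := by
  unfold selv; split_ifs <;> first | rfl | omega

theorem foldl_selv_cons (seg : List Int) :
    ∀ (lista : List Int) (p i : Int),
      seg.foldl (selv lista) (selv lista p i) = selv lista p (seg.foldl (selv lista) i) := by
  induction seg with
  | nil => intro lista p i; rfl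
  | cons j rest ih =>
      intro lista p i
      simp only [List.foldl_cons, selv_assoc, ih]

theorem foldl_pair (seg : List Int) :
    ∀ (lista : List Int) (p c : Int),
      seg.foldl
        (fun st i =>
          ((if PySem.List.pyGetD lista i 0 > PySem.List.pyGetD lista st.1 0 then i else st.1),
           st.2 + 1)) (p, c)
      = (seg.foldl (selv lista) p, c + (seg.length : Int)) := by
  induction seg with
  | nil => intro lista p c; simp
  | cons j rest ih =>
      intro lista p c
      simp only [List.foldl_cons, ih, List.length_cons, selv, Prod.mk.injEq]
      refine ⟨trivial, by push_cast; ring⟩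

def Fm (lista : List Int) (a b : Int) : Int :=
  (PySem.List.pyRange (a + 1) (b + 1) 1).foldl (selv lista) a

theorem buscar_max_eq (lista : List Int) (a b : Int) :
    buscar_max lista a b = (Fm lista a b, max 0 (b - a)) := by
  unfold buscar_max Fm
  rw [foldl_pair]
  have : ((PySem.List.pyRange (a + 1) (b + 1) 1).length : Int) = max 0 (b - a) := by
    rw [PySem.List.length_pyRange_one]; omega
  rw [this]; simp

theorem range_split : ∀ (n : Nat) (a m b : Int), (m - a).toNat ≤ n → a ≤ m → m ≤ b →
    PySem.List.pyRange a b 1 = PySem.List.pyRange a m 1 ++ PySem.List.pyRange m b 1 := by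
  intro n
  induction n with
  | zero =>
      intro a m b h1 h2 h3
      have : a = m := by omega
      subst this
      rw [PySem.List.pyRange_one_eq_nil (le_refl a)]
      simp
  | succ k ih =>
      intro a m b h1 h2 h3
      rcases eq_or_lt_of_le h2 with heq | hlt
      · subst heq
        rw [PySem.List.pyRange_one_eq_nil (le_refl a)]
        simp
      · rw [PySem.List.pyRange_one_cons (by omega : a < b),
            PySem.List.pyRange_one_cons hlt,
            ih (a + 1) m b (by omega) (by omega) h3]
        rfl

theorem Fm_combine (lista : List Int) (a mid b : Int) (h1 : a ≤ mid) (h2 : mid < b) :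
    Fm lista a b = selv lista (Fm lista a mid) (Fm lista (mid + 1) b) := by
  unfold Fm
  rw [range_split (mid - a).toNat (a + 1) (mid + 1) (b + 1) (by omega) (by omega) (by omega),
      List.foldl_append,
      PySem.List.pyRange_one_cons (by omega : mid + 1 < b + 1),
      List.foldl_cons]
  exact foldl_selv_cons _ lista _ _

theorem buscar_max_alt_eq : ∀ (n : Nat) (lista : List Int) (a b : Int), (b - a).toNat ≤ n →
    buscar_max_alt lista a b = (Fm lista a b, max 0 (b - a)) := by
  intro n
  induction n with
  | zero =>
      intro lista a b h
      have hba : b ≤ a := by omega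
      rw [buscar_max_alt]
      simp only [hba, dif_pos]
      unfold Fm
      rw [PySem.List.pyRange_one_eq_nil (by omega : b + 1 ≤ a + 1)]
      simp; omega
  | succ k ih =>
      intro lista a b h
      by_cases hba : b ≤ a
      · rw [buscar_max_alt]
        simp only [hba, dif_pos]
        unfold Fm
        rw [PySem.List.pyRange_one_eq_nil (by omega : b + 1 ≤ a + 1)]
        simp; omega
      · rw [buscar_max_alt]
        simp only [hba, dif_neg, not_false_iff]
        have hmid1 : a ≤ PySem.Int.floordiv (a + b) 2 := by
          rw [PySem.Int.le_floordiv_iff_mul_le (by omega)]; omega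
        have hmid2 : PySem.Int.floordiv (a + b) 2 < b := by
          rw [PySem.Int.floordiv_lt_iff_lt_mul (by omega)]; omega
        rw [ih lista a (PySem.Int.floordiv (a + b) 2) (by omega),
            ih lista (PySem.Int.floordiv (a + b) 2 + 1) b (by omega)]
        rw [Fm_combine lista a (PySem.Int.floordiv (a + b) 2) b hmid1 hmid2]
        unfold selv
        simp only [Prod.mk.injEq]
        refine ⟨trivial, by omega⟩

-- ===== VERDICT (by name: the statement is the Claim_ definition above) =====
theorem buscar_max_spec : Claim_equal_buscar_max := by
  intro lista a b _ _
  unfold Spec_buscar_max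
  rw [buscar_max_eq, buscar_max_alt_eq (b - a).toNat lista a b (le_refl _)]
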